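-- pv_equiv track=rewrite | github.com/patizidexiaopingtou/TowerSafe | developtools/syscap_codec/tools/syscap_check.py | find_files_containes_value
-- ===== SOURCE A (Python) =====
-- def find_files_containes_value(value_set: set, file_values_dict: dict) -> dict:
--     """
--     查看包含指定值的文件
--     :param value_set: 指定值
--     :param file_values_dict: 文件和值组成的dict
--     :return: 值和文件组成的dict
--     """
--     value_files_dict = dict()
--     for v in value_set:
--         filename_set = set()
--         for file in file_values_dict.keys():
--             if v in file_values_dict[file]:
--                 filename_set.add(file)
--         if 0 != len(filename_set):
--             value_files_dict[v] = filename_set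
--     return value_files_dict
-- ===== SOURCE B (Python) =====
-- def find_files_containes_value(value_set: set, file_values_dict: dict) -> dict:
--     """Inverted index: one pass over the (file, value) entries instead of scanning all files per value."""
--     bucket = {}
--     for file, values in file_values_dict.items():
--         for v in values:
--             if v in value_set:
--                 bucket.setdefault(v, set()).add(file)
--     return {v: bucket[v] for v in value_set if v in bucket}
-- ===== Notes on version B (the rewrite author's own statement) =====
-- stated objective: faster
-- what changed: Instead of scanning every file's value list once per element of value_set, B makes a single pass over the (file, value) entries building an inverted index value->set-of-files, then emits the entries in value_set order.
import Mathlib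
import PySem

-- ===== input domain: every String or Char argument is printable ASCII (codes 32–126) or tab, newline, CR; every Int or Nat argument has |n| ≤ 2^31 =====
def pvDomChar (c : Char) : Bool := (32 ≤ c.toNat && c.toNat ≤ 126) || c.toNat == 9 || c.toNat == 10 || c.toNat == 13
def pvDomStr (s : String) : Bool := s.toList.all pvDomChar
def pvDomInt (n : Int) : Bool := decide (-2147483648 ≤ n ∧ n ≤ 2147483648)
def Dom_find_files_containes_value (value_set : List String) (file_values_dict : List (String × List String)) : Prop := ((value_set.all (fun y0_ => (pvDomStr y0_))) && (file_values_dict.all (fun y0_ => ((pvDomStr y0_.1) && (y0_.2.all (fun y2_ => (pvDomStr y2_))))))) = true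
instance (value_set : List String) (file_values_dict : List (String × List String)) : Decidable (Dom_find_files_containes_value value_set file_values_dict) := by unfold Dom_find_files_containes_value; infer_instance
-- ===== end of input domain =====

-- B replaces A's per-value scan of all files by a single inverted-index pass over the (file, value) entries (objective: faster).

-- ===== PORT A =====
-- literal transliteration: for v in value_set: scan file_values_dict.keys(), collect files containing v, insert if nonempty
def find_files_containes_value (value_set : List String) (file_values_dict : List (String × List String)) : List (String × List String) :=
  let d : PySem.Dict String (List String) := PySem.Dict.mk file_values_dict
  (value_set.foldl (fun (value_files_dict : PySem.Dict String (PySem.Set String)) v =>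
      let filename_set : PySem.Set String :=
        d.keys.foldl (fun s file =>
          -- file_values_dict[file]: the key comes from .keys(), so the lookup never raises; getD is exact here
          if v ∈ d.getD file [] then PySem.Set.add s file else s) PySem.Set.empty
      if filename_set.length ≠ 0 then value_files_dict.insert v filename_set else value_files_dict)
    PySem.Dict.empty).items

-- ===== PORT B =====
-- literal transliteration of Source B: bucket = inverted index value -> set of files, then emit in value_set order
def find_files_containes_value_alt (value_set : List String) (file_values_dict : List (String × List String)) : List (String × List String) :=
  let bucket : PySem.Dict String (PySem.Set String) :=
    file_values_dict.foldl (fun b p =>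
      p.2.foldl (fun b v =>
        if value_set.contains v then
          -- bucket.setdefault(v, set()).add(file): the set object is mutated in place, so the key keeps its position
          b.insert v (PySem.Set.add (b.getD v PySem.Set.empty) p.1)
        else b) b) PySem.Dict.empty
  value_set.foldl (fun acc v =>
    match bucket.get? v with
    | some fs => acc ++ [(v, fs)]
    | none => acc) []

-- ===== PRECONDITION & SPEC =====
-- Pre_ excludes duplicate elements in value_set and duplicate keys in file_values_dict: Python's set and dict
-- types make such inputs unrepresentable (the List encoding cannot enforce that invariant), so A never sees them.
def Pre_find_files_containes_value (value_set : List String) (file_values_dict : List (String × List String)) : Prop :=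
  value_set.Nodup ∧ (file_values_dict.map Prod.fst).Nodup
instance (value_set : List String) (file_values_dict : List (String × List String)) : Decidable (Pre_find_files_containes_value value_set file_values_dict) := by unfold Pre_find_files_containes_value; infer_instance
def pvWitness_find_files_containes_value : List String × (List (String × List String)) :=
  (["a", "b", "z"], [("f1", ["a", "c"]), ("f2", ["b", "a"]), ("f3", [])])

def Spec_find_files_containes_value (value_set : List String) (file_values_dict : List (String × List String)) (out : List (String × List String)) : Prop := out = find_files_containes_value_alt value_set file_values_dict
instance (value_set : List String) (file_values_dict : List (String × List String)) (out : List (String × List String)) : Decidable (Spec_find_files_containes_value value_set file_values_dict out) := by unfold Spec_find_files_containes_value; infer_instance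

-- ===== CLAIM (what is proved, stated in full; the proofs are below) =====
def Claim_equal_find_files_containes_value : Prop := ∀ (value_set : List String) (file_values_dict : List (String × List String)), Dom_find_files_containes_value value_set file_values_dict → Pre_find_files_containes_value value_set file_values_dict → Spec_find_files_containes_value value_set file_values_dict (find_files_containes_value value_set file_values_dict)

-- ===== LEMMAS AND PROOFS =====

-- the common per-value file list: files of fvd whose value list contains v, in fvd order, started from s
def pvFiles (v : String) (fvd : List (String × List String)) (s : PySem.Set String) : PySem.Set String :=
  fvd.foldl (fun s p => if v ∈ p.2 then PySem.Set.add s p.1 else s) s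

theorem set_add_ne_nil {α : Type} [BEq α] (s : PySem.Set α) (x : α) : s.add x ≠ [] := by
  simp only [PySem.Set.add]
  split
  · rename_i h
    intro hnil
    subst hnil
    simp [PySem.Set.contains] at h
  · simp

theorem set_add_idem {α : Type} [BEq α] [LawfulBEq α] (s : PySem.Set α) (x : α) :
    (s.add x).add x = s.add x := by
  by_cases hx : x ∈ s
  · simp [PySem.Set.add, PySem.Set.contains, hx]
  · simp [PySem.Set.add, PySem.Set.contains, hx]

theorem pvFiles_ne_nil (v : String) (fvd : List (String × List String)) (s : PySem.Set String)
    (h : s ≠ []) : pvFiles v fvd s ≠ [] := by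
  induction fvd generalizing s with
  | nil => exact h
  | cons p t ih =>
    simp only [pvFiles, List.foldl_cons]
    by_cases hv : v ∈ p.2
    · simp only [hv, if_pos]
      exact ih _ (set_add_ne_nil s p.1)
    · simp only [hv, if_neg, not_false_iff]; exact ih _ h

theorem pvFiles_nil_iff (v : String) (fvd : List (String × List String)) :
    pvFiles v fvd [] = [] ↔ ∀ p ∈ fvd, v ∉ p.2 := by
  induction fvd with
  | nil => simp [pvFiles]
  | cons p t ih =>
    simp only [pvFiles, List.foldl_cons]
    by_cases hv : v ∈ p.2
    · simp only [hv, if_pos]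
      constructor
      · intro h
        exact absurd h (pvFiles_ne_nil v t _ (set_add_ne_nil [] p.1))
      · intro h; exact absurd hv (h p (by simp))
    · simp only [hv, if_neg, not_false_iff]
      rw [show (t.foldl (fun s p => if v ∈ p.2 then PySem.Set.add s p.1 else s) [] = pvFiles v t []) from rfl, ih]
      simp_all

-- A's inner loop over d.keys with lookups equals the direct fold over the pairs (keys unique)
theorem filesA_eq_pvFiles (v : String) (fvd : List (String × List String))
    (hnd : (fvd.map Prod.fst).Nodup) :
    (PySem.Dict.mk fvd).keys.foldl (fun s file =>
        if v ∈ (PySem.Dict.mk fvd).getD file [] then PySem.Set.add s file else s) PySem.Set.empty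
      = pvFiles v fvd [] := by
  have hkeys : (PySem.Dict.mk fvd).keys = fvd.map Prod.fst := rfl
  rw [hkeys, List.foldl_map]
  apply PySem.List.foldl_congr_mem
  intro acc p hp
  have hmem : (p.1, p.2) ∈ (PySem.Dict.mk fvd).items := hp
  have hknd : (PySem.Dict.mk fvd).keys.Nodup := hnd
  rw [PySem.Dict.getD_of_mem_items _ hmem hknd []]

-- effect of one file's inner value loop on a single lookup
theorem step_get? (value_set : List String) (p : String × List String)
    (b : PySem.Dict String (PySem.Set String)) (v : String) :
    (p.2.foldl (fun b w =>
        if value_set.contains w then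
          b.insert w (PySem.Set.add (b.getD w PySem.Set.empty) p.1)
        else b) b).get? v
      = if v ∈ value_set ∧ v ∈ p.2
          then some (PySem.Set.add (b.getD v []) p.1)
          else b.get? v := by
  obtain ⟨f, vs⟩ := p
  simp only
  induction vs generalizing b with
  | nil => simp
  | cons w t ih =>
    simp only [List.foldl_cons]
    rw [ih]
    by_cases hw : w ∈ value_set
    · by_cases hvw : v = w
      · subst hvw
        simp only [hw, List.contains_iff_mem.mpr hw, if_pos, List.mem_cons, true_or, and_true,
          true_and]
        by_cases hvt : v ∈ t
        · simp only [hvt, if_pos]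
          rw [PySem.Dict.getD_insert_self]
          congr 1
          exact set_add_idem _ _
        · simp [hvt, PySem.Dict.get?_insert_self]
      · simp only [List.contains_iff_mem.mpr hw, if_pos]
        rw [PySem.Dict.getD_insert_of_ne _ _ _ hvw, PySem.Dict.get?_insert_of_ne _ _ hvw]
        simp [List.mem_cons, hvw]
    · have hc : value_set.contains w = false := by
        simp [hw]
      simp only [hc, if_neg, Bool.false_eq_true, not_false_iff]
      by_cases hvw : v = w
      · subst hvw; simp [hw]
      · simp [List.mem_cons, hvw]

-- the bucket's lookup after the whole outer loop
theorem bucket_get? (value_set : List String) (fvd : List (String × List String))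
    (b : PySem.Dict String (PySem.Set String)) (v : String) (hv : v ∈ value_set) :
    (fvd.foldl (fun b p =>
        p.2.foldl (fun b w =>
          if value_set.contains w then
            b.insert w (PySem.Set.add (b.getD w PySem.Set.empty) p.1)
          else b) b) b).get? v
      = if (b.get? v).isSome ∨ ∃ p ∈ fvd, v ∈ p.2
          then some (pvFiles v fvd ((b.get? v).getD []))
          else none := by
  induction fvd generalizing b with
  | nil =>
    simp only [List.foldl_nil, List.not_mem_nil, false_and, exists_false, or_false, pvFiles,
      List.foldl_nil]
    cases h : b.get? v <;> simp
  | cons p t ih =>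
    simp only [List.foldl_cons]
    rw [ih]
    have hb1 := step_get? value_set p b v
    by_cases hvp : v ∈ p.2
    · rw [hb1]
      simp only [hv, hvp, and_self, if_pos, Option.isSome_some, true_or, if_pos, Option.getD_some]
      have : ∃ q ∈ p :: t, v ∈ q.2 := ⟨p, by simp, hvp⟩
      simp only [this, or_true, if_pos]
      have : b.getD v [] = (b.get? v).getD [] := PySem.Dict.getD_eq_get?_getD b v []
      rw [this]
      simp [pvFiles, hvp]
    · rw [hb1]
      simp only [hvp, and_false, if_neg, not_false_iff]
      have hmem : (∃ q ∈ p :: t, v ∈ q.2) ↔ ∃ q ∈ t, v ∈ q.2 := by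
        simp only [List.mem_cons]
        constructor
        · rintro ⟨q, (rfl | hq), hvq⟩
          · exact absurd hvq hvp
          · exact ⟨q, hq, hvq⟩
        · rintro ⟨q, hq, hvq⟩; exact ⟨q, Or.inr hq, hvq⟩
      simp only [hmem]
      have : pvFiles v (p :: t) ((b.get? v).getD []) = pvFiles v t ((b.get? v).getD []) := by
        simp [pvFiles, hvp]
      rw [this]

-- the output loops agree, given disjointness of the accumulator keys from the remaining values
theorem final_loop (value_set : List String) (fvd : List (String × List String))
    (bucket : PySem.Dict String (PySem.Set String))
    (hb : ∀ v ∈ value_set, bucket.get? v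
        = if pvFiles v fvd [] = [] then none else some (pvFiles v fvd []))
    (vfd : PySem.Dict String (PySem.Set String))
    (hdisj : ∀ v ∈ value_set, vfd.contains v = false)
    (hnd : value_set.Nodup) :
    (value_set.foldl (fun vfd v =>
        if (pvFiles v fvd []).length ≠ 0 then vfd.insert v (pvFiles v fvd []) else vfd) vfd).items
      = value_set.foldl (fun acc v =>
          match bucket.get? v with
          | some fs => acc ++ [(v, fs)]
          | none => acc) vfd.items := by
  induction value_set generalizing vfd with
  | nil => simp
  | cons v t ih =>
    simp only [List.foldl_cons]
    have hbv := hb v (by simp)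
    by_cases hz : pvFiles v fvd [] = []
    · simp only [hz, if_pos] at hbv
      have hA0 : (if (pvFiles v fvd []).length ≠ 0 then vfd.insert v (pvFiles v fvd []) else vfd)
          = vfd := by
        rw [if_neg]; simpa using hz
      rw [hA0]
      simp only [hbv]
      exact ih (fun w hw => hb w (by simp [hw])) vfd (fun w hw => hdisj w (by simp [hw]))
        (List.Nodup.of_cons hnd)
    · simp only [hz, if_neg, not_false_iff] at hbv
      have hlen : (pvFiles v fvd []).length ≠ 0 := by simpa using hz
      rw [if_pos hlen]
      simp only [hbv]
      have hitems : (vfd.insert v (pvFiles v fvd [])).items = vfd.items ++ [(v, pvFiles v fvd [])] :=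
        PySem.Dict.items_insert_of_not_contains _ _ (hdisj v (by simp))
      rw [ih (fun w hw => hb w (by simp [hw])) (vfd.insert v (pvFiles v fvd []))
        (fun w hw => by
          rw [PySem.Dict.contains_insert]
          have : w ≠ v := fun h => (List.nodup_cons.mp hnd).1 (h ▸ hw)
          simp [this, hdisj w (by simp [hw])])
        (List.Nodup.of_cons hnd), hitems]

-- ===== VERDICT (by name: the statement is the Claim_ definition above) =====
theorem find_files_containes_value_spec : Claim_equal_find_files_containes_value := by
  intro value_set fvd _hdom hpre
  obtain ⟨hndv, hndk⟩ := hpre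
  unfold Spec_find_files_containes_value find_files_containes_value find_files_containes_value_alt
  simp only
  have hA : ∀ (acc : PySem.Dict String (PySem.Set String)) (v : String),
      (fun (value_files_dict : PySem.Dict String (PySem.Set String)) v =>
        let filename_set : PySem.Set String :=
          (PySem.Dict.mk fvd).keys.foldl (fun s file =>
            if v ∈ (PySem.Dict.mk fvd).getD file [] then PySem.Set.add s file else s)
            PySem.Set.empty
        if filename_set.length ≠ 0 then value_files_dict.insert v filename_set
        else value_files_dict) acc v
      = if (pvFiles v fvd []).length ≠ 0 then acc.insert v (pvFiles v fvd []) else acc := by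
    intro acc v
    simp only [filesA_eq_pvFiles v fvd hndk]
  rw [funext fun acc => funext fun v => hA acc v]
  have hb : ∀ v ∈ value_set,
      (fvd.foldl (fun b p =>
        p.2.foldl (fun b w =>
          if value_set.contains w then
            b.insert w (PySem.Set.add (b.getD w PySem.Set.empty) p.1)
          else b) b) PySem.Dict.empty).get? v
        = if pvFiles v fvd [] = [] then none else some (pvFiles v fvd []) := by
    intro v hv
    rw [bucket_get? value_set fvd PySem.Dict.empty v hv]
    simp only [PySem.Dict.get?_empty, Option.isSome_none, Bool.false_eq_true, false_or,
      Option.getD_none]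
    by_cases hz : pvFiles v fvd [] = []
    · have : ¬ ∃ p ∈ fvd, v ∈ p.2 := by
        rw [pvFiles_nil_iff] at hz
        push Not
        exact hz
      simp [this, hz]
    · have : ∃ p ∈ fvd, v ∈ p.2 := by
        by_contra h
        push Not at h
        exact hz ((pvFiles_nil_iff v fvd).mpr h)
      simp [this, hz]
  rw [final_loop value_set fvd _ hb PySem.Dict.empty (fun _ _ => PySem.Dict.contains_empty _) hndv]
  rfl
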